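-- pv_equiv track=rewrite | github.com/ZaytsevNS/python_codewars | 7KYU/show_sequence.py | show_sequence
-- ===== SOURCE A (Python) =====
-- def show_sequence(n: int) -> str:
--     if n < 0:
--         return f'{n}<0'
--     elif n == 0:
--         return f'{n}=0'
--     else:
--         series = ''
--         for i in range(n + 1):
--             series += str(i) + '+'
--         return f'{series[:-1]} = {sum(i for i in range(n + 1))}'
-- ===== SOURCE B (Python) =====
-- def show_sequence(n: int) -> str:
--     if n < 0:
--         return f'{n}<0'
--     elif n == 0:
--         return f'{n}=0'
--     else:
--         return '+'.join(str(i) for i in range(n + 1)) + f' = {n * (n + 1) // 2}'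
-- ===== Notes on version B (the rewrite author's own statement) =====
-- stated objective: simpler
-- what changed: B replaces A's append-loop (building '0+1+...+' then slicing off the trailing '+') and the separate generator sum with a single '+'.join over range(n+1) and the closed-form total n*(n+1)//2.
import Mathlib
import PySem

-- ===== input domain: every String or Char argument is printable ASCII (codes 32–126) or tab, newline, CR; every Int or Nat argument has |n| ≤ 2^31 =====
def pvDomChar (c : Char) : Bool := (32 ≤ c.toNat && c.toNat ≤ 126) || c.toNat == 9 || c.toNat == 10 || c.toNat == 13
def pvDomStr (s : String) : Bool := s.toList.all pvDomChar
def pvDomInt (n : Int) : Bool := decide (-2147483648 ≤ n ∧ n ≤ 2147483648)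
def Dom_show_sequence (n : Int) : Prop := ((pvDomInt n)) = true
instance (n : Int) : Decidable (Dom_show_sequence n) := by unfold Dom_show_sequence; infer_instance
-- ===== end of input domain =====

-- B replaces A's append-loop plus generator sum with a single '+'.join and the closed-form total n*(n+1)//2 (simpler).
-- Strings are ported as List Char via the PySem.Chars bridge and packed with String.ofList at the end.

-- ===== PORT A =====
def show_sequence (n : Int) : String :=
  if n < 0 then String.ofList (PySem.Int.toChars n ++ "<0".toList)
  else if n = 0 then String.ofList (PySem.Int.toChars n ++ "=0".toList)
  else
    let series : List Char :=
      (PySem.List.pyRange 0 (n + 1) 1).foldl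
        (fun acc i => acc ++ (PySem.Int.toChars i ++ ['+'])) []
    let total : Int := (PySem.List.pyRange 0 (n + 1) 1).foldl (· + ·) 0
    String.ofList (PySem.List.slice series none (some (-1)) ++ " = ".toList ++ PySem.Int.toChars total)

-- ===== PORT B =====
def show_sequence_alt (n : Int) : String :=
  if n < 0 then String.ofList (PySem.Int.toChars n ++ "<0".toList)
  else if n = 0 then String.ofList (PySem.Int.toChars n ++ "=0".toList)
  else
    String.ofList (PySem.Chars.join ['+'] ((PySem.List.pyRange 0 (n + 1) 1).map PySem.Int.toChars)
      ++ " = ".toList ++ PySem.Int.toChars (PySem.Int.floordiv (n * (n + 1)) 2))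

-- ===== PRECONDITION & SPEC =====
def Spec_show_sequence (n : Int) (out : String) : Prop := out = show_sequence_alt n
instance (n : Int) (out : String) : Decidable (Spec_show_sequence n out) := by unfold Spec_show_sequence; infer_instance

-- ===== CLAIM (what is proved, stated in full; the proofs are below) =====
def Claim_equal_show_sequence : Prop := ∀ (n : Int), Dom_show_sequence n → Spec_show_sequence n (show_sequence n)

-- ===== LEMMAS AND PROOFS =====

-- the append-loop with a trailing '+' is join with one extra '+' at the end
lemma flatMap_plus_eq_join (l : List Int) (hl : l ≠ []) :
    l.flatMap (fun i => PySem.Int.toChars i ++ ['+'])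
      = PySem.Chars.join ['+'] (l.map PySem.Int.toChars) ++ ['+'] := by
  induction l with
  | nil => simp at hl
  | cons x xs ih =>
    cases xs with
    | nil => simp [PySem.Chars.join_singleton]
    | cons y ys =>
      rw [List.flatMap_cons, ih (by simp)]
      simp only [List.map_cons]
      rw [PySem.Chars.join_cons_cons]
      simp

-- the sum loop over range(m) equals m*(m-1)/2, stated multiplied out
lemma sum_pyRange_mul_two (m : Int) (hm : 0 ≤ m) :
    2 * (PySem.List.pyRange 0 m 1).foldl (· + ·) 0 = m * (m - 1) := by
  obtain ⟨k, rfl⟩ := Int.eq_ofNat_of_zero_le hm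
  induction k with
  | zero => simp
  | succ j ih =>
    rw [show ((j + 1 : Nat) : Int) = (j : Int) + 1 by push_cast; ring,
      PySem.List.pyRange_one_succ_right (by positivity), List.foldl_append]
    simp only [List.foldl_cons, List.foldl_nil]
    rw [mul_add, ih (by positivity)]
    ring

-- ===== VERDICT (by name: the statement is the Claim_ definition above) =====
theorem show_sequence_spec : Claim_equal_show_sequence := by
  intro n _
  unfold Spec_show_sequence show_sequence show_sequence_alt
  by_cases h1 : n < 0
  · simp [h1]
  · by_cases h2 : n = 0
    · simp [h2]
    · have hn : 0 < n := lt_of_le_of_ne (not_lt.mp h1) (Ne.symm h2)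
      simp only [h1, h2, if_false]
      have hne : PySem.List.pyRange 0 (n + 1) 1 ≠ [] := by
        rw [PySem.List.pyRange_one_cons (by omega)]; simp
      rw [PySem.List.foldl_append_eq_flatMap, List.nil_append,
        flatMap_plus_eq_join _ hne, PySem.List.slice_to_neg_one,
        List.dropLast_concat]
      have hsum : (PySem.List.pyRange 0 (n + 1) 1).foldl (· + ·) 0
          = PySem.Int.floordiv (n * (n + 1)) 2 := by
        have h2s := sum_pyRange_mul_two (n + 1) (by omega)
        have hmul : n * (n + 1) = 2 * (PySem.List.pyRange 0 (n + 1) 1).foldl (· + ·) 0 := by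
          rw [h2s]; ring
        rw [hmul, PySem.Int.floordiv_eq_ediv_of_pos (by norm_num),
          Int.mul_ediv_cancel_left _ (by norm_num)]
      rw [hsum]
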